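-- pv_equiv track=rewrite | github.com/Andrew-Suber/project-euler | lib_project_euler.py | create_hexagon_numbers
-- ===== SOURCE A (Python) =====
-- def create_hexagon_numbers(limit):
--     """Return a set of hexagon numbers up to limit."""
--     hexagons = {0}
--     increment = 1
--     value = 0
--     while True:
--         value += increment
--         increment += 4
--         if value > limit:
--             break
--         hexagons.add(value)
--     return hexagons
-- ===== SOURCE B (Python) =====
-- def create_hexagon_numbers(limit):
--     """Return a set of hexagon numbers up to limit."""
--     # Stage 1: find k = number of hexagonal numbers (n >= 1) not exceeding limit.
--     k = 0
--     while (k + 1) * (2 * k + 1) <= limit: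
--         k += 1
--     # Stage 2: build the set from the closed form over the index range.
--     hexagons = {0}
--     for n in range(1, k + 1):
--         hexagons.add(n * (2 * n - 1))
--     return hexagons
-- ===== Notes on version B (the rewrite author's own statement) =====
-- stated objective: alternative
-- what changed: B works in two stages: it first computes the count k of hexagonal numbers not exceeding limit, then builds the set by mapping the closed form n*(2*n-1) over range(1, k+1), instead of A's single while-loop maintaining a (value, increment) accumulator with increment += 4.
import Mathlib
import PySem

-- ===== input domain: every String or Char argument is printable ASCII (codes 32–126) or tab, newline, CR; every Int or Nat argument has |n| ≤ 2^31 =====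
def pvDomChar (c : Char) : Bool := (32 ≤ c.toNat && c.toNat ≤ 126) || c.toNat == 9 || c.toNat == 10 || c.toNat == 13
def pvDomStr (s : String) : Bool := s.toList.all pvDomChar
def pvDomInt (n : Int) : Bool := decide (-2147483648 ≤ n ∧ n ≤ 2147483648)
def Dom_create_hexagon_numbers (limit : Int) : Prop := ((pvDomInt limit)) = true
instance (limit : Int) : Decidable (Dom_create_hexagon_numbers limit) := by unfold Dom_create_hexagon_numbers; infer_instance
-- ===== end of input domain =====

-- B first counts the hexagonal numbers ≤ limit, then builds the set over range(1, k+1)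
-- with the closed form n*(2*n-1), instead of A's single (value, increment) while-loop (objective: alternative).

-- ===== PORT A =====
-- A's 'while True' loop: value += increment; increment += 4; break when value > limit, else add.
-- The hypothesis 0 < increment is only for termination (holds: increment starts at 1, grows by 4).
def pvALoop (limit value increment : Int) (hexagons : List Int) (h : 0 < increment) : List Int :=
  let value' := value + increment
  let increment' := increment + 4
  if hgt : value' > limit then hexagons
  else pvALoop limit value' increment' (PySem.Set.add hexagons value') (by omega)
termination_by (limit - value).toNat
decreasing_by omega

def create_hexagon_numbers (limit : Int) : List Int :=
  pvALoop limit 0 1 (PySem.Set.ofList [0]) (by omega)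

-- ===== PORT B =====
-- B's stage 1: 'while (k+1)*(2*k+1) <= limit: k += 1'.
-- The hypothesis 0 ≤ k is only for termination.
def pvCount (limit k : Int) (h : 0 ≤ k) : Int :=
  if hle : (k + 1) * (2 * k + 1) ≤ limit then pvCount limit (k + 1) (by omega)
  else k
termination_by (limit - k).toNat
decreasing_by
  have : k + 1 ≤ (k + 1) * (2 * k + 1) := by nlinarith
  omega

-- B's stage 2: 'for n in range(1, k+1): hexagons.add(n*(2*n-1))' starting from {0}.
def create_hexagon_numbers_alt (limit : Int) : List Int :=
  let k := pvCount limit 0 le_rfl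
  (PySem.List.pyRange 1 (k + 1) 1).foldl
    (fun s n => PySem.Set.add s (n * (2 * n - 1))) (PySem.Set.ofList [0])

-- ===== PRECONDITION & SPEC =====
def Spec_create_hexagon_numbers (limit : Int) (out : List Int) : Prop := out = create_hexagon_numbers_alt limit
instance (limit : Int) (out : List Int) : Decidable (Spec_create_hexagon_numbers limit out) := by unfold Spec_create_hexagon_numbers; infer_instance

-- ===== CLAIM (what is proved, stated in full; the proofs are below) =====
def Claim_equal_create_hexagon_numbers : Prop := ∀ (limit : Int), Dom_create_hexagon_numbers limit → Spec_create_hexagon_numbers limit (create_hexagon_numbers limit)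

-- ===== LEMMAS AND PROOFS =====

-- The count never decreases below its starting index.
theorem pvCount_ge (limit : Int) (N : Nat) :
    ∀ (k : Int) (h : 0 ≤ k), (limit - k).toNat ≤ N → k ≤ pvCount limit k h := by
  induction N with
  | zero =>
    intro k h hN
    rw [pvCount.eq_def]
    split_ifs with hle
    · exfalso
      have : k + 1 ≤ (k + 1) * (2 * k + 1) := by nlinarith
      omega
    · exact le_rfl
  | succ N ih =>
    intro k h hN
    rw [pvCount.eq_def]
    split_ifs with hle
    · have hk1 : k + 1 ≤ (k + 1) * (2 * k + 1) := by nlinarith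
      have := ih (k + 1) (by omega) (by omega)
      omega
    · exact le_rfl

-- Lockstep invariant: from A's state after k iterations (value = k*(2k-1), increment = 4k+1),
-- A's remaining loop equals B's fold over the remaining index range (k+1 .. cnt).
theorem pvLoop_fold (limit : Int) (N : Nat) :
    ∀ (k : Int) (hk : 0 ≤ k), (limit + 1 - k).toNat ≤ N → ∀ (acc : List Int) (ha : (0:Int) < 4 * k + 1),
      pvALoop limit (k * (2 * k - 1)) (4 * k + 1) acc ha =
        (PySem.List.pyRange (k + 1) (pvCount limit k hk + 1) 1).foldl
          (fun s n => PySem.Set.add s (n * (2 * n - 1))) acc := by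
  induction N with
  | zero =>
    intro k hk hN acc ha
    have hkN : limit + 1 ≤ k := by omega
    rw [pvALoop.eq_def, pvCount.eq_def]
    have hv : k * (2 * k - 1) + (4 * k + 1) = (k + 1) * (2 * k + 1) := by ring
    have hbig : (k + 1) * (2 * k + 1) > limit := by nlinarith
    simp only [hv]
    rw [dif_pos hbig, dif_neg (by omega), PySem.List.pyRange_one_eq_nil (by omega)]
    rfl
  | succ N ih =>
    intro k hk hN acc ha
    rw [pvALoop.eq_def, pvCount.eq_def]
    have hv : k * (2 * k - 1) + (4 * k + 1) = (k + 1) * (2 * k + 1) := by ring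
    simp only [hv]
    by_cases hle : (k + 1) * (2 * k + 1) ≤ limit
    · rw [dif_neg (by omega), dif_pos hle]
      have hcge : k + 1 ≤ pvCount limit (k + 1) (by omega) := by
        exact pvCount_ge limit (limit - (k + 1)).toNat (k + 1) (by omega) le_rfl
      rw [PySem.List.pyRange_one_cons (by omega)]
      have hk1 : k + 1 ≤ limit := by nlinarith
      have := ih (k + 1) (by omega) (by omega)
        (PySem.Set.add acc ((k + 1) * (2 * k + 1))) (by omega)
      simp only [List.foldl_cons]
      have hval : (k + 1) * (2 * (k + 1) - 1) = (k + 1) * (2 * k + 1) := by ring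
      rw [hval]
      calc pvALoop limit ((k + 1) * (2 * k + 1)) (4 * k + 1 + 4)
              (PySem.Set.add acc ((k + 1) * (2 * k + 1))) (by omega)
          = pvALoop limit ((k + 1) * (2 * (k + 1) - 1)) (4 * (k + 1) + 1)
              (PySem.Set.add acc ((k + 1) * (2 * k + 1))) (by omega) := by
            congr 1 <;> ring
        _ = (PySem.List.pyRange (k + 1 + 1) (pvCount limit (k + 1) (by omega) + 1) 1).foldl
              (fun s n => PySem.Set.add s (n * (2 * n - 1)))
              (PySem.Set.add acc ((k + 1) * (2 * k + 1))) := this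
    · rw [dif_pos (by omega), dif_neg hle, PySem.List.pyRange_one_eq_nil (by omega)]
      rfl

-- ===== VERDICT (by name: the statement is the Claim_ definition above) =====
theorem create_hexagon_numbers_spec : Claim_equal_create_hexagon_numbers := by
  intro limit _
  unfold Spec_create_hexagon_numbers create_hexagon_numbers create_hexagon_numbers_alt
  have := pvLoop_fold limit (limit + 1).toNat 0 le_rfl (by omega) (PySem.Set.ofList [0]) (by omega)
  simpa using this
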